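-- pv_equiv track=rewrite | github.com/Alexbokoff/roulette | File/empty_list_1.1.py | next_number_list
-- ===== SOURCE A (Python) =====
-- def next_number_list(number, list_number):
--     next_numbers = []
--     for i in range(len(list_number)):
--         if i == len(list_number) - 1:
--             continue
--         elif list_number[i] == number:
--             next_numbers.append(list_number[i + 1])
--     return next_numbers
-- ===== SOURCE B (Python) =====
-- def next_number_list(number, list_number):
--     out = []
--     it = reversed(list_number)
--     nxt = next(it, None)
--     for cur in it:
--         if cur == number:
--             out.append(nxt)
--         nxt = cur
--     out.reverse()
--     return out
-- ===== Notes on version B (the rewrite author's own statement) =====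
-- stated objective: alternative
-- what changed: B traverses the list back-to-front carrying the successor element as loop state (no indexing, no len-1 guard), collects matches in reverse and reverses the output once at the end.
import Mathlib
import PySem

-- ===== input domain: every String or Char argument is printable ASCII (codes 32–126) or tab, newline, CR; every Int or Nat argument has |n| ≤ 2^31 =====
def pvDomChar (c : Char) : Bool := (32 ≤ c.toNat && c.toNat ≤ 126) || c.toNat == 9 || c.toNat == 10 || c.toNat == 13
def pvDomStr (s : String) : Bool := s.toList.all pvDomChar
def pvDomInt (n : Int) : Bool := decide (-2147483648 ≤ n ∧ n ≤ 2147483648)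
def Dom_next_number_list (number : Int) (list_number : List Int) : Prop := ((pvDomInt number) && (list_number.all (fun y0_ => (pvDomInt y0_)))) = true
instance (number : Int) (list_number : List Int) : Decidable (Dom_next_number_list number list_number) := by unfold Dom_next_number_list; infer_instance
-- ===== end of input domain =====

-- B traverses the list back-to-front carrying the successor element as loop state and reverses the output once at the end; same result, no indexing.

-- ===== PORT A =====
def next_number_list (number : Int) (list_number : List Int) : List Int :=
  (PySem.List.pyRange 0 (list_number.length : Int)).foldl
    (fun next_numbers i =>
      if i == (list_number.length : Int) - 1 then next_numbers
      else if PySem.List.pyGetD list_number i 0 == number then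
        next_numbers ++ [PySem.List.pyGetD list_number (i + 1) 0]
      else next_numbers)
    []

-- ===== PORT B =====
-- reversed(list_number) with its first element drawn off as the initial `nxt`;
-- the loop carries (out, nxt); out is reversed at the end.
def next_number_list_alt (number : Int) (list_number : List Int) : List Int :=
  match list_number.reverse with
  | [] => []
  | n0 :: rest =>
    (rest.foldl
      (fun (s : List Int × Int) cur =>
        (if cur == number then s.1 ++ [s.2] else s.1, cur))
      ([], n0)).1.reverse

-- ===== PRECONDITION & SPEC =====
def Spec_next_number_list (number : Int) (list_number : List Int) (out : List Int) : Prop := out = next_number_list_alt number list_number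
instance (number : Int) (list_number : List Int) (out : List Int) : Decidable (Spec_next_number_list number list_number out) := by unfold Spec_next_number_list; infer_instance

-- ===== CLAIM (what is proved, stated in full; the proofs are below) =====
def Claim_equal_next_number_list : Prop := ∀ (number : Int) (list_number : List Int), Dom_next_number_list number list_number → Spec_next_number_list number list_number (next_number_list number list_number)

-- ===== LEMMAS AND PROOFS =====

-- canonical forward recursion: successor of each occurrence of `number`
def pvCf (number : Int) : List Int → List Int
  | a :: b :: t => (if a == number then [b] else []) ++ pvCf number (b :: t)
  | _ => []

-- what B's loop body computes, as a forward recursion over the reversed list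
def pvScan (number : Int) : Int → List Int → List Int
  | _, [] => []
  | prev, cur :: t => (if cur == number then [prev] else []) ++ pvScan number cur t

-- filterMap of an if-some-else-none is map-after-filter
theorem filterMap_if_eq_map_filter {α β : Type} (p : α → Bool) (f : α → β) (l : List α) :
    l.filterMap (fun x => if p x then some (f x) else none) = (l.filter p).map f := by
  induction l with
  | nil => rfl
  | cons x xs ih =>
    by_cases h : p x <;> simp [h, ih]

-- the adjacent-pair list is the image of the index range 0 .. len-2
theorem zip_tail_eq_map_range (xs : List Int) :
    xs.zip xs.tail =
      (PySem.List.pyRange 0 ((xs.length : Int) - 1)).map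
        (fun i => (PySem.List.pyGetD xs i 0, PySem.List.pyGetD xs (i + 1) 0)) := by
  rw [PySem.List.pyRange_one]
  apply List.ext_getElem
  · simp [List.length_zip]
  · intro k h1 h2
    have hk : k + 1 < xs.length := by
      simp [List.length_zip] at h1; omega
    have hc1 : ((0 : Int) + (k : Int)) = ((k : Nat) : Int) := by omega
    have hc2 : ((k : Int) + 1) = (((k + 1 : Nat)) : Int) := by push_cast; ring
    simp only [List.getElem_map, List.getElem_zip, List.getElem_tail, List.getElem_range, hc1,
      PySem.List.pyGetD_natCast]
    rw [hc2, PySem.List.pyGetD_natCast]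
    rw [List.getD_eq_getElem _ _ (by omega), List.getD_eq_getElem _ _ (by omega)]

-- A equals the filterMap over adjacent pairs
theorem next_number_list_eq_zip (number : Int) (xs : List Int) :
    next_number_list number xs =
      (xs.zip xs.tail).filterMap (fun p => if p.1 == number then some p.2 else none) := by
  unfold next_number_list
  cases xs with
  | nil => rfl
  | cons a l =>
    have hlen : ((a :: l).length : Int) = ((l.length : Int)) + 1 := by simp
    rw [hlen, PySem.List.pyRange_one_succ_right (by positivity), List.foldl_append]
    have hlast : ∀ acc : List Int,
        (if (l.length : Int) == ((l.length : Int) + 1) - 1 then acc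
         else if PySem.List.pyGetD (a :: l) (l.length : Int) 0 == number then
           acc ++ [PySem.List.pyGetD (a :: l) ((l.length : Int) + 1) 0]
         else acc) = acc := by
      intro acc; simp
    simp only [List.foldl, hlast]
    rw [PySem.List.foldl_congr_mem _ _
      (fun acc i =>
        if PySem.List.pyGetD (a :: l) i 0 == number then
          acc ++ [PySem.List.pyGetD (a :: l) (i + 1) 0]
        else acc) []
      (by
        intro acc i hi
        rw [PySem.List.mem_pyRange_one] at hi
        have hne : ¬ i = (l.length : Int) := by omega
        simp [hne])]
    rw [PySem.List.foldl_append_if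
      (fun i => PySem.List.pyGetD (a :: l) i 0 == number)
      (fun i => PySem.List.pyGetD (a :: l) (i + 1) 0)]
    rw [zip_tail_eq_map_range]
    have hl : ((a :: l).length : Int) - 1 = (l.length : Int) := by omega
    rw [hl, List.filterMap_map]
    simp only [Function.comp]
    rw [filterMap_if_eq_map_filter
      (fun i => PySem.List.pyGetD (a :: l) i 0 == number)
      (fun i => PySem.List.pyGetD (a :: l) (i + 1) 0)]
    simp

-- the adjacent-pair filterMap is the forward recursion pvCf
theorem zip_filterMap_eq_pvCf (number : Int) (xs : List Int) :
    (xs.zip xs.tail).filterMap (fun p => if p.1 == number then some p.2 else none) =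
      pvCf number xs := by
  induction xs with
  | nil => rfl
  | cons a t ih =>
    cases t with
    | nil => rfl
    | cons b u =>
      by_cases h : a = number
      · simp [pvCf, h]
        simpa using ih
      · simp [pvCf, h]
        simpa using ih

-- snoc characterisation of pvCf
theorem pvCf_snoc (number : Int) (v : List Int) (x : Int) :
    pvCf number (v ++ [x]) =
      pvCf number v ++
        (match v.getLast? with
         | some a => if a == number then [x] else []
         | none => []) := by
  induction v with
  | nil => rfl
  | cons a t ih =>
    cases t with
    | nil => by_cases h : a == number <;> simp [pvCf, h]
    | cons b u =>
      have : (a :: b :: u) ++ [x] = a :: ((b :: u) ++ [x]) := by simp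
      rw [this]
      show (if a == number then [b] else []) ++ pvCf number ((b :: u) ++ [x]) = _
      rw [ih]
      simp [pvCf, List.getLast?_cons_cons]

-- pvScan over the reversed suffix, reversed back, is pvCf of the forward list
theorem pvScan_reverse (number : Int) (l : List Int) (prev : Int) :
    (pvScan number prev l).reverse = pvCf number (l.reverse ++ [prev]) := by
  induction l generalizing prev with
  | nil => rfl
  | cons c t ih =>
    show ((if c == number then [prev] else []) ++ pvScan number c t).reverse = _
    rw [List.reverse_append, ih]
    have harr : (c :: t).reverse ++ [prev] = (t.reverse ++ [c]) ++ [prev] := by simp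
    rw [harr, pvCf_snoc number (t.reverse ++ [c]) prev]
    have hlast : (t.reverse ++ [c]).getLast? = some c := by simp
    rw [hlast]
    by_cases h : c == number <;> simp [h]

-- B's foldl computes pvScan
theorem foldl_eq_pvScan (number : Int) (rest : List Int) (acc : List Int) (prev : Int) :
    (rest.foldl
      (fun (s : List Int × Int) cur =>
        (if cur == number then s.1 ++ [s.2] else s.1, cur))
      (acc, prev)).1 = acc ++ pvScan number prev rest := by
  induction rest generalizing acc prev with
  | nil => simp [pvScan]
  | cons c t ih =>
    show (t.foldl _ ((if c == number then acc ++ [prev] else acc), c)).1 = _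
    rw [ih]
    by_cases h : c == number <;> simp [pvScan, h]

theorem next_number_list_alt_eq_pvCf (number : Int) (xs : List Int) :
    next_number_list_alt number xs = pvCf number xs := by
  unfold next_number_list_alt
  rcases hrev : xs.reverse with _ | ⟨n0, rest⟩
  · have : xs = [] := by
      have := congrArg List.reverse hrev; simpa using this
    simp [this, pvCf]
  · show (rest.foldl
        (fun (s : List Int × Int) cur =>
          (if cur == number then s.1 ++ [s.2] else s.1, cur))
        ([], n0)).1.reverse = pvCf number xs
    rw [foldl_eq_pvScan, List.nil_append, pvScan_reverse]
    have : rest.reverse ++ [n0] = xs := by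
      have := congrArg List.reverse hrev; simpa using this.symm
    rw [this]

-- ===== VERDICT (by name: the statement is the Claim_ definition above) =====
theorem next_number_list_spec : Claim_equal_next_number_list := by
  intro number list_number _
  show _ = _
  rw [next_number_list_eq_zip, zip_filterMap_eq_pvCf, next_number_list_alt_eq_pvCf]
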